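-- pv_equiv track=rewrite | github.com/BenjaminCartwright/svg_project | src/svg/features.py | count_prompt_sentences_like_splits
-- ===== SOURCE A (Python) =====
-- def count_prompt_sentences_like_splits(text: str) -> int:
--     """Estimate the number of sentence-like prompt segments.
--
--     Args:
--         text (str): Prompt text or any value coercible to a string.
--
--     Returns:
--         int: Heuristic count based on punctuation and newline separators. Returns ``0`` for blank
--             text and at least ``1`` for non-empty text.
--     """
--     text = "" if text is None else str(text)
--     if not text.strip():
--         return 0
--     separators = [".", ";", ":", "!", "?", "\n"]
--     count = 1
--     for sep in separators:
--         count += text.count(sep)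
--     return count
-- ===== SOURCE B (Python) =====
-- def count_prompt_sentences_like_splits(text: str) -> int:
--     """One character-wise pass: count = 1 + number of separator characters."""
--     text = "" if text is None else str(text)
--     if not text.strip():
--         return 0
--     seps = {".", ";", ":", "!", "?", "\n"}
--     return 1 + sum(1 for ch in text if ch in seps)
-- ===== Notes on version B (the rewrite author's own statement) =====
-- stated objective: simpler
-- what changed: Replaces the six per-separator str.count scans (one full pass of the text per separator) with a single character-wise pass that sums membership in a separator set.
import Mathlib
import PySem

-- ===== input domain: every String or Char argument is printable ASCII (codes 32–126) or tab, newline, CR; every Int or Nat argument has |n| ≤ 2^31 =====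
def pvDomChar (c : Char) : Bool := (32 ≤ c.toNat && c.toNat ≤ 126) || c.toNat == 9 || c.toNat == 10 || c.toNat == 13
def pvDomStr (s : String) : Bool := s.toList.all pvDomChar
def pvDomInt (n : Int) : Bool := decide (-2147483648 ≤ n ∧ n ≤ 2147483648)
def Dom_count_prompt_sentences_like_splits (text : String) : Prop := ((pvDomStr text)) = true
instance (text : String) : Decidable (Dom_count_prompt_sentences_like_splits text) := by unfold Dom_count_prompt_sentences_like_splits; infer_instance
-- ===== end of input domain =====

-- ===== PORT A =====
-- A: guard on blank strip, then add text.count(sep) for each of the six separators.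
def count_prompt_sentences_like_splits (text : String) : Int :=
  if (PySem.Str.strip text).isEmpty then 0
  else
    ([".", ";", ":", "!", "?", "\n"] : List String).foldl
      (fun acc sep => acc + (PySem.Str.count text sep : Int)) 1

-- ===== PORT B =====
-- B: one pass over the characters, summing membership in the separator set.
def count_prompt_sentences_like_splits_alt (text : String) : Int :=
  if (PySem.Str.strip text).isEmpty then 0
  else 1 + (text.toList.countP
      (fun ch => (['.', ';', ':', '!', '?', '\n'] : List Char).contains ch) : Int)

-- ===== PRECONDITION & SPEC =====
def Spec_count_prompt_sentences_like_splits (text : String) (out : Int) : Prop := out = count_prompt_sentences_like_splits_alt text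
instance (text : String) (out : Int) : Decidable (Spec_count_prompt_sentences_like_splits text out) := by unfold Spec_count_prompt_sentences_like_splits; infer_instance

-- ===== CLAIM (what is proved, stated in full; the proofs are below) =====
def Claim_equal_count_prompt_sentences_like_splits : Prop := ∀ (text : String), Dom_count_prompt_sentences_like_splits text → Spec_count_prompt_sentences_like_splits text (count_prompt_sentences_like_splits text)

-- ===== LEMMAS AND PROOFS =====

-- ===== VERDICT (by name: the statement is the Claim_ definition above) =====
-- Chars.count.go on a one-character needle counts occurrences of that character.
theorem count_go_singleton (c : Char) : ∀ (s : List Char) (fuel acc : Nat),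
    s.length ≤ fuel → PySem.Chars.count.go [c] fuel s acc = acc + s.count c := by
  intro s
  induction s with
  | nil => intro fuel acc _; cases fuel <;> simp [PySem.Chars.count.go]
  | cons h t ih =>
    intro fuel acc hle
    cases fuel with
    | zero => simp at hle
    | succ n =>
      simp only [PySem.Chars.count.go, List.isPrefixOf, List.count_cons]
      by_cases hc : c = h
      · subst hc
        simp only [BEq.rfl, Bool.true_and, if_pos]
        rw [show ([c].length) = 1 from rfl]
        simp only [List.drop_succ_cons, List.drop_zero]
        rw [ih n (acc + 1) (by simpa using hle)]
        omega
      · have : (c == h) = false := beq_eq_false_iff_ne.mpr hc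
        simp only [this, Bool.false_and, if_neg Bool.false_ne_true]
        rw [ih n acc (by simpa using hle)]
        have hhc : (h == c) = false := beq_eq_false_iff_ne.mpr (Ne.symm hc)
        simp only [hhc, if_neg Bool.false_ne_true]
        omega

theorem count_singleton (s : List Char) (c : Char) :
    PySem.Chars.count s [c] = s.count c := by
  simp only [PySem.Chars.count, List.isEmpty_cons, if_neg Bool.false_ne_true]
  simpa using count_go_singleton c s s.length 0 le_rfl

-- countP over the six-element separator set splits into six single-char counts.
theorem countP_six (l : List Char) :
    l.countP (fun ch => (['.', ';', ':', '!', '?', '\n'] : List Char).contains ch)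
      = l.count '.' + l.count ';' + l.count ':' + l.count '!' + l.count '?' + l.count '\n' := by
  induction l with
  | nil => rfl
  | cons a t ih =>
    simp only [List.countP_cons, List.count_cons]
    rw [ih]
    by_cases h1 : a = '.' <;> by_cases h2 : a = ';' <;> by_cases h3 : a = ':' <;>
      by_cases h4 : a = '!' <;> by_cases h5 : a = '?' <;> by_cases h6 : a = '\n' <;>
      simp_all <;> omega

theorem count_prompt_sentences_like_splits_spec : Claim_equal_count_prompt_sentences_like_splits := by
  intro text _
  unfold Spec_count_prompt_sentences_like_splits
  unfold count_prompt_sentences_like_splits count_prompt_sentences_like_splits_alt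
  by_cases hb : (PySem.Str.strip text).isEmpty
  · simp [hb]
  · have e1 : (".".toList) = ['.'] := rfl
    have e2 : (";".toList) = [';'] := rfl
    have e3 : (":".toList) = [':'] := rfl
    have e4 : ("!".toList) = ['!'] := rfl
    have e5 : ("?".toList) = ['?'] := rfl
    have e6 : ("\n".toList) = ['\n'] := rfl
    simp only [hb, if_neg Bool.false_ne_true, List.foldl_cons, List.foldl_nil,
      PySem.Str.count_eq, e1, e2, e3, e4, e5, e6, count_singleton, countP_six]
    push_cast
    ring
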